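-- pv_equiv track=rewrite | github.com/PhilipQuirke/verified_transformers | QuantaTools/quanta_map_impact.py | sort_unique_digits
-- ===== SOURCE A (Python) =====
-- def sort_unique_digits(raw_input_string, do_reverse):
--     digit_string = ''.join(filter(str.isdigit, raw_input_string))
--
--     seen = set()
--     unique_digits = ""
--     for char in digit_string:
--         if char not in seen:
--             seen.add(char)
--             unique_digits += char
--
--     return ''.join(sorted(unique_digits, reverse=do_reverse))
-- ===== SOURCE B (Python) =====
-- def sort_unique_digits(raw_input_string, do_reverse):
--     # sort-first, then drop adjacent duplicates in one pass
--     s = sorted(filter(str.isdigit, raw_input_string), reverse=do_reverse)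
--     out = []
--     for ch in s:
--         if not out or out[-1] != ch:
--             out.append(ch)
--     return ''.join(out)
-- ===== Notes on version B (the rewrite author's own statement) =====
-- stated objective: alternative
-- what changed: B reorders the pipeline: it sorts all extracted digit characters first and then removes duplicates in a single adjacent-equality pass, instead of A's hashset-based dedup of the unsorted digits followed by sorting the unique ones.
import Mathlib
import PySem

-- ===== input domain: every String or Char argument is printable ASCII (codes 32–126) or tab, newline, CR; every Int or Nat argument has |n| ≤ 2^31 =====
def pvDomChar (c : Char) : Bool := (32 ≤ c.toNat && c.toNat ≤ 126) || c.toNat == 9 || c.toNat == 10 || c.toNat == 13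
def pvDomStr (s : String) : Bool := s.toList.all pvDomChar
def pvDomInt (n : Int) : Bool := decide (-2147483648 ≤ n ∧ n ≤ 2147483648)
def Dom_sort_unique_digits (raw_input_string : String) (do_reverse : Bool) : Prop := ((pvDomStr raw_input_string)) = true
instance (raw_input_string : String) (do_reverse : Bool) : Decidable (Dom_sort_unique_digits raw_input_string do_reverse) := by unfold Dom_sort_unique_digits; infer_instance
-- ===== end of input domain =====

-- B reorders A's pipeline: sort the extracted digit characters first, then drop duplicates in
-- one adjacent-equality pass, instead of A's hashset dedup before sorting (alternative
-- decomposition, same return value).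

-- ===== PORT A =====
-- digit_string = filter(str.isdigit, raw); loop with 'seen' set and 'unique_digits' string;
-- return ''.join(sorted(unique_digits, reverse=do_reverse))
def sort_unique_digits (raw_input_string : String) (do_reverse : Bool) : String :=
  String.mk (PySem.List.sorted
    (((raw_input_string.toList.filter PySem.Chars.isdigit).foldl
        (fun (p : PySem.Set Char × List Char) char =>
          if PySem.Set.contains p.1 char then p
          else (PySem.Set.add p.1 char, p.2 ++ [char]))
        (PySem.Set.empty, [])).2)
    (fun x => x) do_reverse)

-- ===== PORT B =====
-- s = sorted(filter(str.isdigit, raw), reverse=do_reverse); one pass appending each char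
-- unless it equals the last kept one; ''.join(out)
def sort_unique_digits_alt (raw_input_string : String) (do_reverse : Bool) : String :=
  String.mk ((PySem.List.sorted (raw_input_string.toList.filter PySem.Chars.isdigit)
      (fun x => x) do_reverse).foldl
    (fun out ch => if out = [] ∨ out.getLast? ≠ some ch then out ++ [ch] else out) [])

-- ===== PRECONDITION & SPEC =====
def Spec_sort_unique_digits (raw_input_string : String) (do_reverse : Bool) (out : String) : Prop := out = sort_unique_digits_alt raw_input_string do_reverse
instance (raw_input_string : String) (do_reverse : Bool) (out : String) : Decidable (Spec_sort_unique_digits raw_input_string do_reverse out) := by unfold Spec_sort_unique_digits; infer_instance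

-- ===== CLAIM (what is proved, stated in full; the proofs are below) =====
def Claim_equal_sort_unique_digits : Prop := ∀ (raw_input_string : String) (do_reverse : Bool), Dom_sort_unique_digits raw_input_string do_reverse → Spec_sort_unique_digits raw_input_string do_reverse (sort_unique_digits raw_input_string do_reverse)

-- ===== LEMMAS AND PROOFS =====

-- A's dedup loop keeps the pair's two components equal (Set.add appends exactly when absent),
-- so the collected string is set-of-first-occurrences = dedup ds.
theorem pvLoopA (l : List Char) : ∀ (s : List Char),
    l.foldl (fun (p : PySem.Set Char × List Char) char =>
        if PySem.Set.contains p.1 char then p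
        else (PySem.Set.add p.1 char, p.2 ++ [char])) (s, s)
      = (l.foldl PySem.Set.add s, l.foldl PySem.Set.add s) := by
  induction l with
  | nil => intro s; rfl
  | cons c t ih =>
    intro s
    have hstep : (if PySem.Set.contains s c then (s, s)
        else (PySem.Set.add s c, s ++ [c])) = (PySem.Set.add s c, PySem.Set.add s c) := by
      by_cases h : c ∈ s <;> simp [PySem.Set.add, h]
    simp only [List.foldl_cons]
    rw [hstep, ih]

-- recursive description of B's adjacent-dedup loop
def pvAdj : Option Char → List Char → List Char
  | _, [] => []
  | last, c :: t => if last = some c then pvAdj last t else c :: pvAdj (some c) t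

theorem pvFoldB (l : List Char) : ∀ (acc : List Char),
    l.foldl (fun out ch => if out = [] ∨ out.getLast? ≠ some ch then out ++ [ch] else out) acc
      = acc ++ pvAdj acc.getLast? l := by
  induction l with
  | nil => intro acc; simp [pvAdj]
  | cons c t ih =>
    intro acc
    simp only [List.foldl_cons]
    by_cases h : acc.getLast? = some c
    · have hne : acc ≠ [] := fun he => by rw [he] at h; simp at h
      have hcond : ¬(acc = [] ∨ acc.getLast? ≠ some c) := by simp [hne, h]
      rw [if_neg hcond, ih]
      simp only [pvAdj]
      rw [if_pos h]
    · have hcond : acc = [] ∨ acc.getLast? ≠ some c := Or.inr h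
      rw [if_pos hcond, ih, List.getLast?_concat]
      simp only [pvAdj]
      rw [if_neg h, List.append_assoc]
      rfl

-- pvAdj on an R-sorted list: the output is strictly R-sorted and keeps exactly the elements
-- other than the one already emitted (antisymmetry of R is all that is needed).
theorem pvAdj_spec (R : Char → Char → Prop) (hA : ∀ a b, R a b → R b a → a = b)
    (l : List Char) : ∀ (last : Option Char), l.Pairwise R →
    (∀ a, last = some a → ∀ x ∈ l, R a x) →
    ((pvAdj last l).Pairwise fun a b => R a b ∧ a ≠ b) ∧
    (∀ x, x ∈ pvAdj last l ↔ (x ∈ l ∧ last ≠ some x)) := by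
  induction l with
  | nil => intro last _ _; simp [pvAdj]
  | cons c t ih =>
    intro last hp hlast
    have hct : ∀ x ∈ t, R c x := (List.pairwise_cons.mp hp).1
    have hpt : t.Pairwise R := (List.pairwise_cons.mp hp).2
    by_cases h : last = some c
    · -- skip c (it was just emitted)
      have ihh := ih last hpt (by
        intro a ha x hx
        have hac : a = c := by rw [h] at ha; exact (Option.some.inj ha).symm
        exact hac ▸ hct x hx)
      simp only [pvAdj]
      rw [if_pos h]
      refine ⟨ihh.1, fun x => ?_⟩
      rw [ihh.2 x]
      constructor
      · rintro ⟨hx, hne⟩; exact ⟨List.mem_cons_of_mem _ hx, hne⟩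
      · rintro ⟨hx, hne⟩
        rcases List.mem_cons.mp hx with rfl | hx
        · exact absurd h hne
        · exact ⟨hx, hne⟩
    · -- emit c
      have ihh := ih (some c) hpt (by
        intro a ha x hx
        exact (Option.some.inj ha) ▸ hct x hx)
      simp only [pvAdj]
      rw [if_neg h]
      constructor
      · refine List.pairwise_cons.mpr ⟨?_, ihh.1⟩
        intro x hx
        have hxt : x ∈ t ∧ (some c : Option Char) ≠ some x := (ihh.2 x).mp hx
        exact ⟨hct x hxt.1, fun he => hxt.2 (by rw [he])⟩
      · intro x
        rw [List.mem_cons, ihh.2 x]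
        constructor
        · rintro (rfl | ⟨hx, hne⟩)
          · exact ⟨List.mem_cons_self, fun he => h he⟩
          · refine ⟨List.mem_cons_of_mem _ hx, fun he => ?_⟩
            -- last = some x with x ∈ t: then R x c and R c x force x = c, contradicting hne
            have hRxc : R x c := hlast x he c List.mem_cons_self
            have hxc : x = c := hA x c hRxc (hct x hx)
            exact hne (by rw [hxc])
        · rintro ⟨hx, hne⟩
          rcases List.mem_cons.mp hx with rfl | hx
          · exact Or.inl rfl
          · by_cases hxc : x = c
            · exact Or.inl hxc
            · exact Or.inr ⟨hx, fun he => hxc (Option.some.inj he).symm⟩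

-- the core fact: sorted(dedup ds, rev) = adjacent-dedup(sorted(ds, rev))
theorem pvCore (ds : List Char) (rev : Bool) :
    PySem.List.sorted (PySem.List.dedup ds) (fun x => x) rev
      = pvAdj none (PySem.List.sorted ds (fun x => x) rev) := by
  have hmemd : ∀ x, x ∈ PySem.List.dedup ds ↔ x ∈ ds := fun x => PySem.List.mem_dedup ds x
  have hnodupd : (PySem.List.dedup ds).Nodup := PySem.List.nodup_dedup ds
  cases rev with
  | false =>
    set l := PySem.List.sorted ds (fun x => x) false with hl
    have hp : l.Pairwise (fun a b => a ≤ b) := PySem.List.sorted_pairwise ds (fun x => x)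
    have hs := pvAdj_spec (fun a b => a ≤ b) (fun a b h1 h2 => le_antisymm h1 h2) l none hp
      (by intro a ha; cases ha)
    have hstrict : (pvAdj none l).Pairwise (fun a b => a < b) :=
      hs.1.imp (fun h => lt_of_le_of_ne h.1 h.2)
    have hnodup : (pvAdj none l).Nodup := hs.1.imp (fun h => h.2)
    have hperm : (pvAdj none l).Perm (PySem.List.dedup ds) := by
      rw [List.perm_ext_iff_of_nodup hnodup hnodupd]
      intro a
      rw [hs.2 a, hmemd a, hl, PySem.List.mem_sorted]
      simp
    exact PySem.List.sorted_eq_of_perm_of_pairwise_lt _ _ _ hperm hstrict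
  | true =>
    set l := PySem.List.sorted ds (fun x => x) true with hl
    have hp : l.Pairwise (fun a b => b ≤ a) := PySem.List.sorted_pairwise_rev ds (fun x => x)
    have hs := pvAdj_spec (fun a b => b ≤ a) (fun a b h1 h2 => le_antisymm h2 h1) l none hp
      (by intro a ha; cases ha)
    have hstrict : (pvAdj none l).Pairwise (fun a b => b < a) :=
      hs.1.imp (fun h => lt_of_le_of_ne h.1 (Ne.symm h.2))
    have hnodup : (pvAdj none l).Nodup := hs.1.imp (fun h => h.2)
    have hperm : (pvAdj none l).Perm (PySem.List.dedup ds) := by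
      rw [List.perm_ext_iff_of_nodup hnodup hnodupd]
      intro a
      rw [hs.2 a, hmemd a, hl, PySem.List.mem_sorted]
      simp
    exact PySem.List.sorted_rev_eq_of_perm_of_pairwise_gt _ _ _ hperm hstrict

-- ===== VERDICT (by name: the statement is the Claim_ definition above) =====
theorem sort_unique_digits_spec : Claim_equal_sort_unique_digits := by
  intro raw_input_string do_reverse _
  unfold Spec_sort_unique_digits sort_unique_digits sort_unique_digits_alt
  set ds := raw_input_string.toList.filter PySem.Chars.isdigit with hds
  have hA : (ds.foldl
      (fun (p : PySem.Set Char × List Char) char =>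
        if PySem.Set.contains p.1 char then p
        else (PySem.Set.add p.1 char, p.2 ++ [char]))
      (PySem.Set.empty, [])).2 = PySem.List.dedup ds := by
    rw [show (PySem.Set.empty, ([] : List Char)) = (([] : List Char), ([] : List Char)) from rfl,
      pvLoopA ds []]
    rw [PySem.List.dedup_eq_ofList, PySem.Set.ofList_eq_foldl]
  have hB := pvFoldB (PySem.List.sorted ds (fun x => x) do_reverse) []
  simp only [List.getLast?_nil, List.nil_append] at hB
  rw [hA, hB, pvCore]
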